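-- pv_equiv track=rewrite | github.com/santhoshinidgm/PythonAssignments | jump_py.py | count_non_space_non_vowels
-- ===== SOURCE A (Python) =====
-- def count_non_space_non_vowels(text):
--     count = 0
--     vowels = 'aeiouAEIOU'
--     for char in text:
--         if char == ' ' or char in vowels:
--             continue
--         count += 1
--     return count
-- ===== SOURCE B (Python) =====
-- def count_non_space_non_vowels(text):
--     excluded = sum(text.count(c) for c in ' aeiouAEIOU')
--     return len(text) - excluded
-- ===== Notes on version B (the rewrite author's own statement) =====
-- stated objective: simpler
-- what changed: B counts the complement: it sums text.count(c) over the 12 excluded characters (space and vowels, pairwise distinct so no double counting) and subtracts that from len(text), instead of A's per-character loop that increments a counter for every kept character.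
import Mathlib
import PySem

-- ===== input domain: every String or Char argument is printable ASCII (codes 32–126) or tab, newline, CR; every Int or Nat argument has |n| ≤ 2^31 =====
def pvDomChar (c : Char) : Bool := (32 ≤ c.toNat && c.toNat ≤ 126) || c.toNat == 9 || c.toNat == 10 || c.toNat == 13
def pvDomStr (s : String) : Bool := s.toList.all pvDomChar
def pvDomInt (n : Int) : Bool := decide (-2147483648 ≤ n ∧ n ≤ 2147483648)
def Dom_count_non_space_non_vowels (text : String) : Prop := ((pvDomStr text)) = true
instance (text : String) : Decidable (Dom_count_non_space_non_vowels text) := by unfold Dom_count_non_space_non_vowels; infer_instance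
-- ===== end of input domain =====

-- B counts the complement (len(text) minus the summed counts of the 12 excluded characters)
-- instead of A's per-character counting loop; objective: simpler decomposition, same O(n) cost.

-- ===== PORT A =====
-- 'char in vowels' is ported as list membership over the vowel characters,
-- exact because 'char' is a single character.
def count_non_space_non_vowels (text : String) : Int :=
  text.toList.foldl
    (fun count char =>
      if char == ' ' || "aeiouAEIOU".toList.contains char then count else count + 1)
    0

-- ===== PORT B =====
def count_non_space_non_vowels_alt (text : String) : Int :=
  PySem.Str.len text -
    (" aeiouAEIOU".toList.map (fun c => (PySem.Str.count text (String.ofList [c]) : Int))).sum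

-- ===== PRECONDITION & SPEC =====
def Spec_count_non_space_non_vowels (text : String) (out : Int) : Prop := out = count_non_space_non_vowels_alt text
instance (text : String) (out : Int) : Decidable (Spec_count_non_space_non_vowels text out) := by unfold Spec_count_non_space_non_vowels; infer_instance

-- ===== CLAIM (what is proved, stated in full; the proofs are below) =====
def Claim_equal_count_non_space_non_vowels : Prop := ∀ (text : String), Dom_count_non_space_non_vowels text → Spec_count_non_space_non_vowels text (count_non_space_non_vowels text)

-- ===== LEMMAS AND PROOFS =====

-- Python str.count for a single-character needle is List.count of that character.
theorem chars_count_go_single (c : Char) : ∀ (fuel : Nat) (l : List Char) (acc : Nat),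
    l.length ≤ fuel → PySem.Chars.count.go [c] fuel l acc = acc + l.count c := by
  intro fuel
  induction fuel with
  | zero =>
    intro l acc h
    cases l with
    | nil => simp [PySem.Chars.count.go]
    | cons hd t => simp at h
  | succ n ih =>
    intro l acc h
    cases l with
    | nil => simp [PySem.Chars.count.go]
    | cons hd t =>
      rw [PySem.Chars.count.go.eq_def]
      simp only [List.length_cons] at h
      by_cases hc : c = hd
      · subst hc
        simp [List.isPrefixOf, ih t (acc + 1) (by omega)]
        omega
      · have h1 : (c == hd) = false := by simpa using hc
        have h2 : (hd == c) = false := by simpa using Ne.symm hc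
        simp [List.isPrefixOf, h1, h2, ih t acc (by omega), List.count_cons]

theorem chars_count_single (l : List Char) (c : Char) :
    PySem.Chars.count l [c] = l.count c := by
  have h := chars_count_go_single c l.length l 0 (le_refl _)
  unfold PySem.Chars.count
  simpa using h

theorem str_count_single (s : String) (c : Char) :
    PySem.Str.count s (String.ofList [c]) = s.toList.count c := by
  rw [PySem.Str.count_eq]
  have h : (String.ofList [c]).toList = [c] := by simp
  rw [h]
  exact chars_count_single s.toList c

-- The sum of the excluded-character counts, one cons step at a time.
theorem sum_counts_cons (ex : List Char) (h : Char) (t : List Char) :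
    (ex.map (fun c => ((h :: t).count c : Int))).sum
      = (ex.map (fun c => (t.count c : Int))).sum + (ex.count h : Int) := by
  induction ex with
  | nil => simp
  | cons e ex ih =>
    simp only [List.map_cons, List.sum_cons]
    rw [ih]
    by_cases hc : e = h
    · subst hc
      simp
      ring
    · have h1 : (e == h) = false := by simpa using hc
      have h2 : (h == e) = false := by simpa using Ne.symm hc
      simp [List.count_cons, h1, h2]
      ring

-- Membership of a character in the excluded list equals A's branch condition.
theorem count_ex (h : Char) :
    ((" aeiouAEIOU".toList).count h : Int)
      = if h == ' ' || "aeiouAEIOU".toList.contains h then 1 else 0 := by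
  have key : (h == ' ' || "aeiouAEIOU".toList.contains h) = true ↔ h ∈ " aeiouAEIOU".toList := by
    show _ ↔ h ∈ (' ' :: "aeiouAEIOU".toList)
    simp
  by_cases hm : h ∈ " aeiouAEIOU".toList
  · rw [List.count_eq_one_of_mem (by decide) hm, if_pos (key.mpr hm)]
    simp
  · rw [List.count_eq_zero_of_not_mem hm, if_neg (fun hcc => hm (key.mp hcc))]
    simp

-- The loop invariant: A's fold equals length minus the excluded-character sum.
theorem foldA (l : List Char) (a : Int) :
    l.foldl (fun count char =>
        if char == ' ' || "aeiouAEIOU".toList.contains char then count else count + 1) a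
      = a + l.length - (" aeiouAEIOU".toList.map (fun c => (l.count c : Int))).sum := by
  induction l generalizing a with
  | nil => simp
  | cons hd t ih =>
    rw [List.foldl_cons, sum_counts_cons, count_ex hd]
    by_cases hc : (hd == ' ' || "aeiouAEIOU".toList.contains hd) = true
    · rw [if_pos hc, if_pos hc, ih]
      simp only [List.length_cons]
      push_cast
      ring
    · rw [if_neg hc, if_neg hc, ih]
      simp only [List.length_cons]
      push_cast
      ring

-- ===== VERDICT (by name: the statement is the Claim_ definition above) =====
theorem count_non_space_non_vowels_spec : Claim_equal_count_non_space_non_vowels := by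
  intro text _
  unfold Spec_count_non_space_non_vowels count_non_space_non_vowels count_non_space_non_vowels_alt
  rw [PySem.Str.len_eq, foldA]
  simp only [str_count_single]
  ring
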